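-- pv_equiv track=rewrite | github.com/joeriben/ai4artsed_webserver | devserver/my_app/routes/media_routes.py | _find_entity_by_type
-- ===== SOURCE A (Python) =====
-- def _find_entity_by_type(entities: list, media_type: str) -> dict:
--     """
--     Find entity in entities array by media type.
--
--     Args:
--         entities: List of entity records from metadata
--         media_type: Type to search for ('image', 'audio', 'video')
--
--     Returns:
--         Entity dict or None
--     """
--     # Search for output_TYPE entities (e.g., output_image, output_audio)
--     for entity in entities:
--         entity_type = entity.get('type', '')
--         if entity_type == f'output_{media_type}':
--             return entity
--
--     # Fallback: Search for just the type (legacy compatibility)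
--     for entity in entities:
--         if entity.get('type') == media_type:
--             return entity
--
--     return None
-- ===== SOURCE B (Python) =====
-- def _find_entity_by_type(entities: list, media_type: str) -> dict:
--     """Single pass: return the first 'output_<type>' entity immediately,
--     remembering the first plain '<type>' entity as a fallback."""
--     target = f'output_{media_type}'
--     fallback = None
--     for entity in entities:
--         t = entity.get('type')
--         if t == target:
--             return entity
--         if fallback is None and t == media_type:
--             fallback = entity
--     return fallback
-- ===== Notes on version B (the rewrite author's own statement) =====
-- stated objective: alternative
-- what changed: Replaced A's two sequential scans of the entity list by one single pass that returns an output_<type> match immediately and remembers the first plain <type> match as a fallback.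
import Mathlib
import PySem

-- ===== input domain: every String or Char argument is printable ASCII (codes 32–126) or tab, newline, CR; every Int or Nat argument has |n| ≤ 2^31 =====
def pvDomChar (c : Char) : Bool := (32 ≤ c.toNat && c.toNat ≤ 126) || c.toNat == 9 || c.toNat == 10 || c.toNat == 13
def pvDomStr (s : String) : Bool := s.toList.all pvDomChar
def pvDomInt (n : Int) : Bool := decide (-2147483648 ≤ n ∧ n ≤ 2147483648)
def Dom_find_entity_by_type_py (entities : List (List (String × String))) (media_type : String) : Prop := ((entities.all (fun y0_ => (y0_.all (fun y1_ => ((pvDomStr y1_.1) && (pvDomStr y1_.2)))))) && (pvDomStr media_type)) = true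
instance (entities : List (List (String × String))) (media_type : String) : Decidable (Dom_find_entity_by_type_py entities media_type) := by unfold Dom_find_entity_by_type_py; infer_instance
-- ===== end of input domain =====

-- ===== PORT A =====
-- B is a one-pass rewrite of A's two scans (returns output_<type> at once, remembers the first plain <type> as fallback).
-- entity.get('type', '') / entity.get('type')
def pvGetTypeD (e : List (String × String)) : String :=
  PySem.Dict.getD (PySem.Dict.mk e) "type" ""

def pvGetType? (e : List (String × String)) : Option String :=
  PySem.Dict.get? (PySem.Dict.mk e) "type"

-- first loop of A: search for an entity whose type is f'output_{media_type}'
def pvOutputScan (target : String) : List (List (String × String)) → Option (List (String × String))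
  | [] => none
  | e :: rest => if pvGetTypeD e = target then some e else pvOutputScan target rest

-- second loop of A: fallback search for an entity whose type is media_type
def pvPlainScan (media_type : String) : List (List (String × String)) → Option (List (String × String))
  | [] => none
  | e :: rest => if pvGetType? e = some media_type then some e else pvPlainScan media_type rest

def find_entity_by_type_py (entities : List (List (String × String))) (media_type : String) : Option (List (String × String)) :=
  match pvOutputScan ("output_" ++ media_type) entities with
  | some e => some e
  | none => pvPlainScan media_type entities

-- ===== PORT B =====
-- the single for-loop of B, carrying the fallback variable
def pvAltLoop (target media_type : String) (fallback : Option (List (String × String))) :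
    List (List (String × String)) → Option (List (String × String))
  | [] => fallback
  | e :: rest =>
    let t := pvGetType? e
    if t = some target then some e
    else if fallback = none ∧ t = some media_type then pvAltLoop target media_type (some e) rest
    else pvAltLoop target media_type fallback rest

def find_entity_by_type_py_alt (entities : List (List (String × String))) (media_type : String) : Option (List (String × String)) :=
  pvAltLoop ("output_" ++ media_type) media_type none entities

-- ===== PRECONDITION & SPEC =====
def Spec_find_entity_by_type_py (entities : List (List (String × String))) (media_type : String) (out : Option (List (String × String))) : Prop := out = find_entity_by_type_py_alt entities media_type
instance (entities : List (List (String × String))) (media_type : String) (out : Option (List (String × String))) : Decidable (Spec_find_entity_by_type_py entities media_type out) := by unfold Spec_find_entity_by_type_py; infer_instance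

-- ===== CLAIM (what is proved, stated in full; the proofs are below) =====
def Claim_equal_find_entity_by_type_py : Prop := ∀ (entities : List (List (String × String))) (media_type : String), Dom_find_entity_by_type_py entities media_type → Spec_find_entity_by_type_py entities media_type (find_entity_by_type_py entities media_type)

-- ===== LEMMAS AND PROOFS =====

theorem pv_target_ne_empty (mt : String) : "output_" ++ mt ≠ "" := by
  intro h
  have h' := congrArg String.length h
  simp [String.length_append] at h'

-- A's getD-with-default-'' test agrees with the get?-test because the target is nonempty
theorem pvGetTypeD_eq_target_iff (e : List (String × String)) (mt : String) :
    pvGetTypeD e = "output_" ++ mt ↔ pvGetType? e = some ("output_" ++ mt) := by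
  unfold pvGetTypeD pvGetType?
  rw [PySem.Dict.getD_eq_get?_getD]
  cases h : PySem.Dict.get? (PySem.Dict.mk e) "type" with
  | none =>
    simp only [Option.getD]
    exact ⟨fun h' => absurd h'.symm (pv_target_ne_empty mt), by simp⟩
  | some v => simp [Option.getD]

theorem pvAltLoop_eq (mt : String) (fallback : Option (List (String × String)))
    (l : List (List (String × String))) :
    pvAltLoop ("output_" ++ mt) mt fallback l =
      match pvOutputScan ("output_" ++ mt) l with
      | some e => some e
      | none => match fallback with
                | some f => some f
                | none => pvPlainScan mt l := by
  induction l generalizing fallback with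
  | nil => cases fallback <;> simp [pvAltLoop, pvOutputScan, pvPlainScan]
  | cons e rest ih =>
    by_cases ht : pvGetType? e = some ("output_" ++ mt)
    · have htD : pvGetTypeD e = "output_" ++ mt := (pvGetTypeD_eq_target_iff e mt).mpr ht
      simp [pvAltLoop, pvOutputScan, ht, htD]
    · have htD : ¬ pvGetTypeD e = "output_" ++ mt := fun h => ht ((pvGetTypeD_eq_target_iff e mt).mp h)
      by_cases hf : fallback = none
      · subst hf
        by_cases hp : pvGetType? e = some mt
        · have hne : mt ≠ "output_" ++ mt := fun h => ht (hp.trans (congrArg some h))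
          simp [pvAltLoop, pvOutputScan, pvPlainScan, htD, hp, ih, hne]
        · simp [pvAltLoop, pvOutputScan, pvPlainScan, ht, htD, hp, ih]
      · obtain ⟨f, rfl⟩ := Option.ne_none_iff_exists'.mp hf
        simp [pvAltLoop, pvOutputScan, ht, htD, ih]

-- ===== VERDICT (by name: the statement is the Claim_ definition above) =====
theorem find_entity_by_type_py_spec : Claim_equal_find_entity_by_type_py := by
  intro entities media_type _
  unfold Spec_find_entity_by_type_py find_entity_by_type_py find_entity_by_type_py_alt
  rw [pvAltLoop_eq]
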